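-- pv_equiv track=rewrite | github.com/ALTA-DE1-Hafidz-15Feb1998/Basic-Programming-Part4 | problem2/main.py | draw_xyz
-- ===== SOURCE A (Python) =====
-- def draw_xyz(N):
--     characters = ['X', 'Y', 'Z']
--     character_index = 0
--     result = ""
--
--     for i in range(1, N**2 + 1):
--         if i % 3 == 0:
--             result += characters[0] + " "
--         else:
--             if i % 2 == 0:
--                 result += characters[2] + " "
--             else:
--                 result += characters[1] + " "
--
--         if i % N == 0:
--             result += "\n"
--
--     return result
-- ===== SOURCE B (Python) =====
-- def draw_xyz(N):
--     n = abs(N)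
--     cells = "Y Z X Z Y X "                  # the cells for i = 1..6; the pattern has period 6
--     base = cells * (n // 6 + 2)             # a tiled strip long enough for any row start
--     rows = [base[2 * off: 2 * (off + n)] + "\n" for off in range(6)]
--     return "".join(rows[(r * n) % 6] for r in range(n))
-- ===== Notes on version B (the rewrite author's own statement) =====
-- stated objective: faster
-- what changed: B drops A's per-cell loop with modulo branches and per-cell newline tests: it tiles the periodic cell pattern into one long strip, slices the handful of possible row strings out of it once, and concatenates the row selected by the row's starting residue; per-cell Python bytecode is replaced by bulk string slicing/joining.
import Mathlib
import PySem

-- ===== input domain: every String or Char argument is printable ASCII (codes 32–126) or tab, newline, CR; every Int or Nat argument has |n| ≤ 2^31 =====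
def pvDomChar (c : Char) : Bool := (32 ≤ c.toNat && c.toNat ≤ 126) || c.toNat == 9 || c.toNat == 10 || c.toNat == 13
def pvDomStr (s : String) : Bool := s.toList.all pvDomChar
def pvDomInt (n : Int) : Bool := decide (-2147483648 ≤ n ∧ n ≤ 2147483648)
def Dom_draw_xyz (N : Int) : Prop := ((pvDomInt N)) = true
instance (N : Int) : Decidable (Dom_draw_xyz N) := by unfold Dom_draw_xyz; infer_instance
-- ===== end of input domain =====

-- B drops A's per-cell branch loop: it tiles the period-6 cell pattern into a strip,
-- slices the 6 possible row strings out of it once, and concatenates the selected rows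
-- (alternative decomposition; same output on every input).

-- ===== PORT A =====
def draw_xyz (N : Int) : String :=
  (PySem.List.pyRange 1 (N ^ 2 + 1) 1).foldl
    (fun result i =>
      let result :=
        if PySem.Int.mod i 3 = 0 then result ++ "X "        -- characters[0] + " "
        else if PySem.Int.mod i 2 = 0 then result ++ "Z "   -- characters[2] + " "
        else result ++ "Y "                                 -- characters[1] + " "
      if PySem.Int.mod i N = 0 then result ++ "\n" else result)
    ""

-- ===== PORT B =====
-- 's * k' (Python string repetition): ported by hand via replicate/flatten; exact for k ≥ 0
def pvStrTimes (s : String) (k : Nat) : String := String.ofList ((List.replicate k s.toList).flatten)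

def draw_xyz_alt (N : Int) : String :=
  let n := N.natAbs
  let cells : String := "Y Z X Z Y X "
  let base := pvStrTimes cells (n / 6 + 2)
  let rows := (List.range 6).map (fun off : Nat =>
    PySem.Str.slice base (some ((2 * off : Nat) : Int)) (some ((2 * (off + n) : Nat) : Int)) ++ "\n")
  PySem.Str.join "" ((List.range n).map (fun r : Nat =>
    PySem.List.pyGetD rows (((r * n) % 6 : Nat) : Int) ""))

-- ===== PRECONDITION & SPEC =====
def Spec_draw_xyz (N : Int) (out : String) : Prop := out = draw_xyz_alt N
instance (N : Int) (out : String) : Decidable (Spec_draw_xyz N out) := by unfold Spec_draw_xyz; infer_instance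

-- ===== CLAIM (what is proved, stated in full; the proofs are below) =====
def Claim_equal_draw_xyz : Prop := ∀ (N : Int), Dom_draw_xyz N → Spec_draw_xyz N (draw_xyz N)

-- ===== LEMMAS AND PROOFS =====

-- the six-cell pattern as a character-list cell, indexed by m % 6
def pvCell (m : Nat) : List Char :=
  ((["X ", "Y ", "Z ", "X ", "Z ", "Y "] : List String).getD (m % 6) "").toList

theorem pvCell_length (m : Nat) : (pvCell m).length = 2 := by
  unfold pvCell
  have h : m % 6 < 6 := Nat.mod_lt m (by norm_num)
  interval_cases h6 : m % 6 <;> rfl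

theorem pvCell_congr {a b : Nat} (h : a % 6 = b % 6) : pvCell a = pvCell b := by
  unfold pvCell; rw [h]

-- "".join(parts) flattens
theorem pv_join_nil (l : List (List Char)) : PySem.Chars.join [] l = l.flatten := by
  unfold PySem.Chars.join List.intercalate
  induction l with
  | nil => rfl
  | cons x xs ih =>
    cases xs with
    | nil => simp
    | cons y ys => simpa [List.intersperse] using ih

-- flatten of a map is flatMap (definitional; named for rewriting)
theorem pv_flatten_map {a : Type} (f : a → List Char) (l : List a) :
    (l.map f).flatten = l.flatMap f := rfl

-- an 'acc ++ …' string fold, seen on the character lists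
theorem pv_foldl_str_toList {a : Type} (g : a → String) (l : List a) (s : String) :
    (l.foldl (fun acc x => acc ++ g x) s).toList = s.toList ++ l.flatMap (fun x => (g x).toList) := by
  induction l generalizing s with
  | nil => simp
  | cons x xs ih => simp [ih, List.append_assoc]

-- A's branch chain is the period-6 table lookup
theorem pv_cell_eq (m : Nat) :
    (if m % 3 = 0 then ['X', ' '] else if m % 2 = 0 then ['Z', ' '] else ['Y', ' ']) = pvCell m := by
  unfold pvCell
  rw [show m % 3 = m % 6 % 3 from (Nat.mod_mod_of_dvd m (by norm_num)).symm,
      show m % 2 = m % 6 % 2 from (Nat.mod_mod_of_dvd m (by norm_num)).symm]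
  have h : m % 6 < 6 := Nat.mod_lt m (by norm_num)
  interval_cases h6 : m % 6 <;> rfl

-- within one block of n cells, the newline fires exactly at the last cell
theorem pv_block (n k : Nat) (hn : 0 < n) :
    (List.range n).flatMap
      (fun j => pvCell (k * n + j + 1) ++ if (k * n + j + 1) % n = 0 then ['\n'] else [])
    = (List.range n).flatMap (fun j => pvCell (k * n + j + 1)) ++ ['\n'] := by
  obtain ⟨p, rfl⟩ : ∃ p, n = p + 1 := ⟨n - 1, by omega⟩
  rw [List.range_succ, List.flatMap_append, List.flatMap_append]
  have hlast : (k * (p + 1) + p + 1) % (p + 1) = 0 := by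
    have : k * (p + 1) + p + 1 = (k + 1) * (p + 1) := by ring
    simp [this, Nat.mul_mod_left]
  have hmid : ∀ j ∈ List.range p,
      (pvCell (k * (p + 1) + j + 1) ++ if (k * (p + 1) + j + 1) % (p + 1) = 0 then ['\n'] else [])
      = pvCell (k * (p + 1) + j + 1) := by
    intro j hj
    rw [List.mem_range] at hj
    have : (k * (p + 1) + j + 1) % (p + 1) = j + 1 := by
      have h1 : k * (p + 1) + j + 1 = (j + 1) + k * (p + 1) := by ring
      rw [h1, Nat.add_mul_mod_self_right, Nat.mod_eq_of_lt (by omega)]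
    simp [this]
  rw [List.flatMap_congr hmid]
  simp [hlast, List.append_assoc]

-- k rows of A's cell stream, regrouped into rows
theorem pv_rows (n : Nat) (hn : 0 < n) (k : Nat) :
    (List.range (k * n)).flatMap
      (fun m => pvCell (m + 1) ++ if (m + 1) % n = 0 then ['\n'] else [])
    = (List.range k).flatMap
        (fun r => (List.range n).flatMap (fun j => pvCell (r * n + j + 1)) ++ ['\n']) := by
  induction k with
  | zero => simp
  | succ k ih =>
    rw [List.range_succ, List.flatMap_append, ← ih, Nat.succ_mul, List.range_add,
        List.flatMap_append, List.flatMap_map]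
    simp only [List.flatMap_singleton]
    congr 1
    have := pv_block n k hn
    simpa [Nat.add_right_comm] using this

-- the A side on character lists
theorem pv_A_toList (N : Int) :
    (draw_xyz N).toList
    = (List.range (N.natAbs * N.natAbs)).flatMap
        (fun m => pvCell (m + 1) ++ if (m + 1) % N.natAbs = 0 then ['\n'] else []) := by
  set n := N.natAbs with hndef
  unfold draw_xyz
  have hlen : (N ^ 2 + 1 - 1).toNat = n * n := by
    have hsq : ((n * n : Nat) : Int) = N * N := by rw [hndef]; exact_mod_cast Int.natAbs_mul_self
    rw [pow_two]; omega
  rw [PySem.List.pyRange_one 1 (N ^ 2 + 1), hlen, List.foldl_map]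
  have hstep : (fun (result : String) (k : Nat) =>
      let result :=
        if PySem.Int.mod (1 + (k : Int)) 3 = 0 then result ++ "X "
        else if PySem.Int.mod (1 + (k : Int)) 2 = 0 then result ++ "Z "
        else result ++ "Y "
      if PySem.Int.mod (1 + (k : Int)) N = 0 then result ++ "\n" else result)
      = fun s k => s ++
          ((if (k + 1) % 3 = 0 then "X " else if (k + 1) % 2 = 0 then "Z " else "Y ")
            ++ (if (k + 1) % n = 0 then "\n" else "")) := by
    funext s k
    have hc : (1 : Int) + (k : Int) = ((k + 1 : Nat) : Int) := by push_cast; ring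
    have h3 : (PySem.Int.mod ((k + 1 : Nat) : Int) 3 = 0) ↔ ((k + 1) % 3 = 0) := by
      rw [PySem.Int.mod_eq_zero_iff_dvd]; omega
    have h2 : (PySem.Int.mod ((k + 1 : Nat) : Int) 2 = 0) ↔ ((k + 1) % 2 = 0) := by
      rw [PySem.Int.mod_eq_zero_iff_dvd]; omega
    have hNn : (PySem.Int.mod ((k + 1 : Nat) : Int) N = 0) ↔ ((k + 1) % n = 0) := by
      rw [PySem.Int.mod_eq_zero_iff_dvd, ← Int.natAbs_dvd, ← hndef, Int.natCast_dvd_natCast]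
      omega
    simp only [hc, h3, h2, hNn]
    split_ifs <;> simp [String.append_assoc]
  rw [hstep, pv_foldl_str_toList]
  refine List.flatMap_congr ?_
  intro k _
  simp [apply_ite String.toList, pv_cell_eq]

-- the tiled strip on character lists: t copies of the 6-cell pattern
theorem pv_rep (t : Nat) :
    (List.replicate t ("Y Z X Z Y X ".toList)).flatten
    = (List.range (6 * t)).flatMap (fun m => pvCell (m + 1)) := by
  induction t with
  | zero => rfl
  | succ t ih =>
    rw [List.replicate_succ, List.flatten_cons, ih,
        show 6 * (t + 1) = 6 + 6 * t by ring, List.range_add, List.flatMap_append,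
        List.flatMap_map,
        show ("Y Z X Z Y X ".toList) = (List.range 6).flatMap (fun m => pvCell (m + 1)) from
          by decide]
    congr 1
    refine List.flatMap_congr ?_
    intro m _
    exact pvCell_congr (by omega)

theorem pv_base_toList (t : Nat) :
    (pvStrTimes "Y Z X Z Y X " t).toList
    = (List.range (6 * t)).flatMap (fun m => pvCell (m + 1)) := by
  unfold pvStrTimes
  rw [← pv_rep t]
  simp

-- length of a cell stream
theorem pv_stream_length (K s : Nat) :
    (((List.range K).flatMap (fun m => pvCell (m + s))).length) = 2 * K := by
  induction K with
  | zero => rfl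
  | succ K ih =>
    rw [List.range_succ, List.flatMap_append]
    simp [ih, pvCell_length]
    omega

-- drop/take on a stream of 2-character cells picks a contiguous run of cells
theorem pv_drop_take (K a b s : Nat) (h : a + b ≤ K) :
    ((((List.range K).flatMap (fun m => pvCell (m + s))).drop (2 * a)).take (2 * b))
    = (List.range b).flatMap (fun m => pvCell (m + a + s)) := by
  conv_lhs => rw [show K = a + (K - a) by omega]
  rw [List.range_add, List.flatMap_append, List.flatMap_map,
      show 2 * a = ((List.range a).flatMap (fun m => pvCell (m + s))).length from
        (pv_stream_length a s).symm,
      List.drop_left]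
  conv_lhs => rw [show K - a = b + (K - a - b) by omega]
  rw [List.range_add, List.flatMap_append]
  have hlen2 : ((List.range b).flatMap (fun x => pvCell (a + x + s))).length = 2 * b := by
    have heq : (List.range b).flatMap (fun x => pvCell (a + x + s))
        = (List.range b).flatMap (fun x => pvCell (x + (a + s))) :=
      List.flatMap_congr (fun m _ => pvCell_congr (by omega))
    rw [heq]
    exact pv_stream_length b (a + s)
  rw [show 2 * b = ((List.range b).flatMap (fun x => pvCell (a + x + s))).length from hlen2.symm,
      List.take_left]
  refine List.flatMap_congr ?_
  intro m _
  exact pvCell_congr (by omega)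

-- one selected row of B on character lists
theorem pv_B_row (n off : Nat) (hoff : off < 6) :
    (PySem.Str.slice (pvStrTimes "Y Z X Z Y X " (n / 6 + 2))
        (some ((2 * off : Nat) : Int)) (some ((2 * (off + n) : Nat) : Int)) ++ "\n").toList
    = (List.range n).flatMap (fun j => pvCell (j + off + 1)) ++ ['\n'] := by
  rw [String.toList_append, PySem.Str.toList_slice, PySem.Chars.slice_eq_listSlice,
      PySem.List.slice_natCast,
      pv_base_toList, show 2 * (off + n) - 2 * off = 2 * n by omega,
      pv_drop_take (6 * (n / 6 + 2)) off n 1 (by omega)]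
  rfl

-- the B side on character lists
theorem pv_B_toList (N : Int) :
    (draw_xyz_alt N).toList
    = (List.range N.natAbs).flatMap
        (fun r => (List.range N.natAbs).flatMap
          (fun j => pvCell (r * N.natAbs + j + 1)) ++ ['\n']) := by
  set n := N.natAbs with hndef
  unfold draw_xyz_alt
  rw [PySem.Str.toList_join]
  show PySem.Chars.join [] _ = _
  rw [pv_join_nil, List.map_map, pv_flatten_map]
  refine List.flatMap_congr ?_
  intro r _
  show (PySem.List.pyGetD ((List.range 6).map _) (((r * n) % 6 : Nat) : Int) "").toList = _
  rw [PySem.List.pyGetD_natCast]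
  have hlt : (r * n) % 6 < 6 := Nat.mod_lt _ (by norm_num)
  have hsel : ((List.range 6).map (fun off : Nat =>
      PySem.Str.slice (pvStrTimes "Y Z X Z Y X " (n / 6 + 2))
        (some ((2 * off : Nat) : Int)) (some ((2 * (off + n) : Nat) : Int)) ++ "\n")).getD
      ((r * n) % 6) ""
      = PySem.Str.slice (pvStrTimes "Y Z X Z Y X " (n / 6 + 2))
          (some ((2 * ((r * n) % 6) : Nat) : Int))
          (some ((2 * ((r * n) % 6 + n) : Nat) : Int)) ++ "\n" := by
    rw [List.getD_eq_getElem?_getD, List.getElem?_map, List.getElem?_range hlt]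
    rfl
  rw [hsel, pv_B_row n ((r * n) % 6) hlt]
  congr 1
  refine List.flatMap_congr ?_
  intro j _
  exact pvCell_congr (by omega)

-- ===== VERDICT =====
theorem draw_xyz_spec : Claim_equal_draw_xyz := by
  intro N _
  unfold Spec_draw_xyz
  by_cases h0 : N.natAbs = 0
  · have : N = 0 := Int.natAbs_eq_zero.mp h0
    subst this; decide
  · apply String.toList_inj.mp
    rw [pv_A_toList N, pv_B_toList]
    have := pv_rows N.natAbs (by omega) N.natAbs
    simpa using this
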